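-- pv_equiv track=rewrite | github.com/DavidNguyen1812/DiscordBots | KnightNexus/MultiEncryption.py | list_shuffle
-- ===== SOURCE A (Python) =====
-- import string
--
-- def list_shuffle(option):
--     original = [char for char in string.printable]
--     new = []
--     if option == 3:  # inverse the first half then second half
--         n = int(len(original) / 2) - 1
--         while n != -1:
--             new.append(original[n])
--             n -= 1
--         n = len(original) - 1
--         while n != int(len(original) / 2) - 1:
--             new.append(original[n])
--             n -= 1
--     elif option % 2 == 0 and option > 3:  # inverse the first half
--         n = int(len(original) / 2) - 1
--         while n != -1:
--             new.append(original[n])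
--             n -= 1
--         n = int(len(original) / 2)
--         while n != len(original):
--             new.append(original[n])
--             n += 1
--     elif option > 3 and option % 2 == 1:  # inverse the second half
--         n = 0
--         while n != int(len(original) / 2):
--             new.append(original[n])
--             n += 1
--         n = len(original) - 1
--         while n != ((len(original) / 2) - 1):
--             new.append(original[n])
--             n -= 1
--
--     if option == 1 or option >= 6:  # swap place between two item
--         if option >= 6:
--             original = new[:]
--             new = []
--         n = 0
--         while n != len(original):
--             new.append(original[n + 1])
--             new.append(original[n])
--             n += 2
--         new = new[:]
--     if option == 2 or option >= 8:  # inverse the whole list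
--         if option >= 8:
--             original = new[:]
--         new = original[::-1]
--     return new
-- ===== SOURCE B (Python) =====
-- import string
--
-- def list_shuffle(option):
--     orig = list(string.printable)
--     h = len(orig) // 2
--     if option == 3:
--         new = orig[:h][::-1] + orig[h:][::-1]
--     elif option > 3 and option % 2 == 0:
--         new = orig[:h][::-1] + orig[h:]
--     elif option > 3 and option % 2 == 1:
--         new = orig[:h] + orig[h:][::-1]
--     else:
--         new = []
--     if option == 1 or option >= 6:
--         base = new if option >= 6 else orig
--         new = [c for pair in zip(base[1::2], base[0::2]) for c in pair]
--     if option == 2 or option >= 8: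
--         base = new if option >= 8 else orig
--         new = base[::-1]
--     return new
-- ===== Notes on version B (the rewrite author's own statement) =====
-- stated objective: simpler
-- what changed: Replaced every index-walking while loop (the two manual half-reversal walks and the n+=2 adjacent-swap loop) with slice expressions over the fixed printable list and a zip-based interleave, keeping the identical option branching.
import Mathlib
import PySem

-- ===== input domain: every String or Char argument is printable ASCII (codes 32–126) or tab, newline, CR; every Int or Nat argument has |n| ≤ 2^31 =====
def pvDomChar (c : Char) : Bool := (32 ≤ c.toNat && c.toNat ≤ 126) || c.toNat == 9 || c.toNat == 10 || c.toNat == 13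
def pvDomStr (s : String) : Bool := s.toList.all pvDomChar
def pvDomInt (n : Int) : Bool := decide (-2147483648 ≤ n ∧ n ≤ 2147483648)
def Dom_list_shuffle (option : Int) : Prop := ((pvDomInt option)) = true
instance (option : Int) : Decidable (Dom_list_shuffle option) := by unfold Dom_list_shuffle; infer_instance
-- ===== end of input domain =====

-- B replaces every index-walking while loop of A with slice/zip expressions over the
-- fixed printable list, keeping the identical option branching (objective: simpler).

-- string.printable (a fixed constant in both sources); [char for char in string.printable]
def pvPrintableStr : String :=
  "0123456789abcdefghijklmnopqrstuvwxyzABCDEFGHIJKLMNOPQRSTUVWXYZ!\"#$%&'()*+,-./:;<=>?@[\\]^_`{|}~ \t\n\r\x0b\x0c"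
def pvOriginal : List String := pvPrintableStr.toList.map (fun c => String.mk [c])

-- ===== PORT A =====
-- original[n]; every executed call is in range (IndexError path unreachable)
def pvIdx (l : List String) (n : Int) : String := (PySem.List.pyGet? l n).getD ""

-- while n != stop: new.append(original[n]); n -= 1   (Python only enters with n ≥ stop,
-- stepping exactly onto stop; the fuel counts those iterations — a totality device only)
def pvLoopDownAux (orig : List String) (stop : Int) : Nat → Int → List String → List String
  | 0, _, acc => acc
  | fuel + 1, n, acc =>
    if n ≤ stop then acc
    else pvLoopDownAux orig stop fuel (n - 1) (acc ++ [pvIdx orig n])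

def pvLoopDown (orig : List String) (stop n : Int) (acc : List String) : List String :=
  pvLoopDownAux orig stop (n - stop).toNat n acc

-- while n != stop: new.append(original[n]); n += 1   (totality fuel likewise)
def pvLoopUpAux (orig : List String) (stop : Int) : Nat → Int → List String → List String
  | 0, _, acc => acc
  | fuel + 1, n, acc =>
    if stop ≤ n then acc
    else pvLoopUpAux orig stop fuel (n + 1) (acc ++ [pvIdx orig n])

def pvLoopUp (orig : List String) (stop n : Int) (acc : List String) : List String :=
  pvLoopUpAux orig stop (stop - n).toNat n acc

-- while n != len(original): new.append(original[n+1]); new.append(original[n]); n += 2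
def pvSwapLoopAux (orig : List String) : Nat → Int → List String → List String
  | 0, _, acc => acc
  | fuel + 1, n, acc =>
    if (orig.length : Int) ≤ n then acc
    else pvSwapLoopAux orig fuel (n + 2) (acc ++ [pvIdx orig (n + 1), pvIdx orig n])

def pvSwapLoop (orig : List String) (n : Int) (acc : List String) : List String :=
  pvSwapLoopAux orig orig.length n acc

def list_shuffle (option : Int) : List String :=
  let original := pvOriginal
  let L : Int := original.length
  let new : List String :=
    if option = 3 then
      pvLoopDown original (L / 2 - 1) (L - 1) (pvLoopDown original (-1) (L / 2 - 1) [])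
    else if option % 2 = 0 ∧ option > 3 then
      pvLoopUp original L (L / 2) (pvLoopDown original (-1) (L / 2 - 1) [])
    else if option > 3 ∧ option % 2 = 1 then
      -- stop here is `(len/2) - 1` computed with float `/` in Python: equal to 49
      pvLoopDown original (L / 2 - 1) (L - 1) (pvLoopUp original (L / 2) 0 [])
    else []
  let pair : List String × List String :=
    if option = 1 ∨ option ≥ 6 then
      let original := if option ≥ 6 then new else original
      (original, pvSwapLoop original 0 [])
    else (original, new)
  if option = 2 ∨ option ≥ 8 then
    (if option ≥ 8 then pair.2 else pair.1).reverse   -- base[::-1]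
  else pair.2

-- ===== PORT B =====
def list_shuffle_alt (option : Int) : List String :=
  let orig := pvOriginal
  let h : Int := PySem.Int.floordiv orig.length 2
  let new : List String :=
    if option = 3 then
      (PySem.List.slice orig none (some h)).reverse ++ (PySem.List.slice orig (some h) none).reverse
    else if option > 3 ∧ option % 2 = 0 then
      (PySem.List.slice orig none (some h)).reverse ++ PySem.List.slice orig (some h) none
    else if option > 3 ∧ option % 2 = 1 then
      PySem.List.slice orig none (some h) ++ (PySem.List.slice orig (some h) none).reverse
    else []
  let new : List String :=
    if option = 1 ∨ option ≥ 6 then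
      let base := if option ≥ 6 then new else orig
      let evens := (PySem.List.slice? base (some 0) none 2).getD []   -- base[0::2]
      let odds  := (PySem.List.slice? base (some 1) none 2).getD []   -- base[1::2]
      (odds.zip evens).flatMap (fun p => [p.1, p.2])
    else new
  if option = 2 ∨ option ≥ 8 then
    (if option ≥ 8 then new else orig).reverse   -- base[::-1]
  else new

-- ===== PRECONDITION & SPEC =====
def Spec_list_shuffle (option : Int) (out : List String) : Prop := out = list_shuffle_alt option
instance (option : Int) (out : List String) : Decidable (Spec_list_shuffle option out) := by unfold Spec_list_shuffle; infer_instance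

-- ===== CLAIM (what is proved, stated in full; the proofs are below) =====
def Claim_equal_list_shuffle : Prop := ∀ (option : Int), Dom_list_shuffle option → Spec_list_shuffle option (list_shuffle option)

-- ===== LEMMAS AND PROOFS =====

-- Both ports only look at option through these facts; fix a representative per class.
set_option maxHeartbeats 4000000 in
theorem pv_congr (o r : Int)
    (h1 : (o = 1) = (r = 1)) (h2 : (o = 2) = (r = 2)) (h3 : (o = 3) = (r = 3))
    (he : (o % 2 = 0 ∧ o > 3) = (r % 2 = 0 ∧ r > 3))
    (ho : (o > 3 ∧ o % 2 = 1) = (r > 3 ∧ r % 2 = 1))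
    (h6 : (o ≥ 6) = (r ≥ 6)) (h8 : (o ≥ 8) = (r ≥ 8)) :
    list_shuffle o = list_shuffle r ∧ list_shuffle_alt o = list_shuffle_alt r := by
  have ho' : (o > 3 ∧ o % 2 = 0) = (r > 3 ∧ r % 2 = 0) := by
    simp only [eq_iff_iff] at he ⊢; tauto
  constructor
  · unfold list_shuffle; simp only [h1, h2, h3, he, ho, h6, h8]
  · unfold list_shuffle_alt; simp only [h1, h2, h3, ho', ho, h6, h8]

-- ===== VERDICT (by name: the statement is the Claim_ definition above) =====
set_option maxHeartbeats 4000000 in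
set_option maxRecDepth 8000 in
theorem list_shuffle_spec : Claim_equal_list_shuffle := by
  intro o _
  unfold Spec_list_shuffle
  -- reduce o to the representative of its class, then evaluate both ports there
  have key : ∃ r : Int, r ∈ ([0,1,2,3,4,5,6,7,8,9] : List Int) ∧
      list_shuffle o = list_shuffle r ∧ list_shuffle_alt o = list_shuffle_alt r := by
    by_cases c1 : o = 1
    · exact ⟨1, by simp, pv_congr o 1 (by simp only [eq_iff_iff]; first | omega | simp_all) (by simp only [eq_iff_iff]; first | omega | simp_all) (by simp only [eq_iff_iff]; first | omega | simp_all) (by simp only [eq_iff_iff]; first | omega | simp_all) (by simp only [eq_iff_iff]; first | omega | simp_all) (by simp only [eq_iff_iff]; first | omega | simp_all) (by simp only [eq_iff_iff]; first | omega | simp_all)⟩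
    by_cases c2 : o = 2
    · exact ⟨2, by simp, pv_congr o 2 (by simp only [eq_iff_iff]; first | omega | simp_all) (by simp only [eq_iff_iff]; first | omega | simp_all) (by simp only [eq_iff_iff]; first | omega | simp_all) (by simp only [eq_iff_iff]; first | omega | simp_all) (by simp only [eq_iff_iff]; first | omega | simp_all) (by simp only [eq_iff_iff]; first | omega | simp_all) (by simp only [eq_iff_iff]; first | omega | simp_all)⟩
    by_cases c3 : o = 3
    · exact ⟨3, by simp, pv_congr o 3 (by simp only [eq_iff_iff]; first | omega | simp_all) (by simp only [eq_iff_iff]; first | omega | simp_all) (by simp only [eq_iff_iff]; first | omega | simp_all) (by simp only [eq_iff_iff]; first | omega | simp_all) (by simp only [eq_iff_iff]; first | omega | simp_all) (by simp only [eq_iff_iff]; first | omega | simp_all) (by simp only [eq_iff_iff]; first | omega | simp_all)⟩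
    by_cases c4 : o = 4
    · exact ⟨4, by simp, pv_congr o 4 (by simp only [eq_iff_iff]; first | omega | simp_all) (by simp only [eq_iff_iff]; first | omega | simp_all) (by simp only [eq_iff_iff]; first | omega | simp_all) (by simp only [eq_iff_iff]; first | omega | simp_all) (by simp only [eq_iff_iff]; first | omega | simp_all) (by simp only [eq_iff_iff]; first | omega | simp_all) (by simp only [eq_iff_iff]; first | omega | simp_all)⟩
    by_cases c5 : o = 5
    · exact ⟨5, by simp, pv_congr o 5 (by simp only [eq_iff_iff]; first | omega | simp_all) (by simp only [eq_iff_iff]; first | omega | simp_all) (by simp only [eq_iff_iff]; first | omega | simp_all) (by simp only [eq_iff_iff]; first | omega | simp_all) (by simp only [eq_iff_iff]; first | omega | simp_all) (by simp only [eq_iff_iff]; first | omega | simp_all) (by simp only [eq_iff_iff]; first | omega | simp_all)⟩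
    by_cases c6 : o = 6
    · exact ⟨6, by simp, pv_congr o 6 (by simp only [eq_iff_iff]; first | omega | simp_all) (by simp only [eq_iff_iff]; first | omega | simp_all) (by simp only [eq_iff_iff]; first | omega | simp_all) (by simp only [eq_iff_iff]; first | omega | simp_all) (by simp only [eq_iff_iff]; first | omega | simp_all) (by simp only [eq_iff_iff]; first | omega | simp_all) (by simp only [eq_iff_iff]; first | omega | simp_all)⟩
    by_cases c7 : o = 7
    · exact ⟨7, by simp, pv_congr o 7 (by simp only [eq_iff_iff]; first | omega | simp_all) (by simp only [eq_iff_iff]; first | omega | simp_all) (by simp only [eq_iff_iff]; first | omega | simp_all) (by simp only [eq_iff_iff]; first | omega | simp_all) (by simp only [eq_iff_iff]; first | omega | simp_all) (by simp only [eq_iff_iff]; first | omega | simp_all) (by simp only [eq_iff_iff]; first | omega | simp_all)⟩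
    by_cases clo : o < 1
    · exact ⟨0, by simp, pv_congr o 0 (by simp only [eq_iff_iff]; first | omega | simp_all) (by simp only [eq_iff_iff]; first | omega | simp_all) (by simp only [eq_iff_iff]; first | omega | simp_all) (by simp only [eq_iff_iff]; first | omega | simp_all) (by simp only [eq_iff_iff]; first | omega | simp_all) (by simp only [eq_iff_iff]; first | omega | simp_all) (by simp only [eq_iff_iff]; first | omega | simp_all)⟩
    by_cases hp : o % 2 = 0
    · exact ⟨8, by simp, pv_congr o 8 (by simp only [eq_iff_iff]; first | omega | simp_all) (by simp only [eq_iff_iff]; first | omega | simp_all) (by simp only [eq_iff_iff]; first | omega | simp_all) (by simp only [eq_iff_iff]; first | omega | simp_all) (by simp only [eq_iff_iff]; first | omega | simp_all) (by simp only [eq_iff_iff]; first | omega | simp_all) (by simp only [eq_iff_iff]; first | omega | simp_all)⟩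
    · exact ⟨9, by simp, pv_congr o 9 (by simp only [eq_iff_iff]; first | omega | simp_all) (by simp only [eq_iff_iff]; first | omega | simp_all) (by simp only [eq_iff_iff]; first | omega | simp_all) (by simp only [eq_iff_iff]; first | omega | simp_all) (by simp only [eq_iff_iff]; first | omega | simp_all) (by simp only [eq_iff_iff]; first | omega | simp_all) (by simp only [eq_iff_iff]; first | omega | simp_all)⟩
  obtain ⟨r, hr, hA, hB⟩ := key
  rw [hA, hB]
  fin_cases hr <;> decide
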